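-- pv_equiv track=rewrite | github.com/vaehanna/aois5 | main.py | PDNF
-- ===== SOURCE A (Python) =====
-- def PDNF(table, arguments_number):
--     formula = []
--     arguments = create_dictionary(arguments_number)
--     for i in range(len(table)):
--         if table[i] == 1:
--             bracket = []
--             for arg_index in range(1, arguments_number + 1):
--                 bracket.append(arguments['x' + str(arg_index)][i])
--             formula.append(bracket)
--     return formula
--
-- def create_dictionary(arguments_number):
--     dictionary = []
--     for i in range(arguments_number):
--         index = i + 1
--         same = 2 ** (arguments_number - index)
--         array = [0 for j in range(same)]
--         array += [1 for j in range(same)]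
--         while len(array) < 2 ** (arguments_number):
--             array += array
--         dictionary.append(['x' + str(index), array])
--     dictionary = dict(dictionary)
--     return dictionary
-- ===== SOURCE B (Python) =====
-- def PDNF(table, arguments_number):
--     n = arguments_number
--     if n <= 0:
--         return [[] for v in table if v == 1]
--     return [[(i >> (n - k)) & 1 for k in range(1, n + 1)]
--             for i, v in enumerate(table) if v == 1]
-- ===== Notes on version B (the rewrite author's own statement) =====
-- stated objective: faster
-- what changed: B derives each variable's value for a selected row directly as (i >> (n-k)) & 1 from the row index, instead of materialising n full 2^n-long truth-table columns in a dictionary and indexing into them.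
import Mathlib
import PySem

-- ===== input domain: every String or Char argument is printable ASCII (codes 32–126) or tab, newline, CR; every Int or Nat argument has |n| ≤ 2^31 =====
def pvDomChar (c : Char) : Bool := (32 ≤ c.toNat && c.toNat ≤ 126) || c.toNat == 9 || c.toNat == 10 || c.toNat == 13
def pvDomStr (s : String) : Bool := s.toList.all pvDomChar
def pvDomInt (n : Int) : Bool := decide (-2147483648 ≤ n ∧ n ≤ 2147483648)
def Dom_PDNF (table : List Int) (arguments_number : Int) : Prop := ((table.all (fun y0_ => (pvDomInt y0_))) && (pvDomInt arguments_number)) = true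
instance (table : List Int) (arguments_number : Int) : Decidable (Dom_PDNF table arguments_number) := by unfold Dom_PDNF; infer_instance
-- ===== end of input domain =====

-- B computes each selected row's bits directly from the row index ((i >> (n-k)) & 1),
-- skipping A's construction of n full 2^n-long truth-table columns. Intended as faster
-- (avoids the 2^n-sized columns); a timing run saw A time out where B returned but
-- measured only 1.49x at the largest size both finished, so the speed-up is unconfirmed.

-- ===== PORT A =====
-- the 'while len(array) < 2**n: array += array' loop; fuel bounds the iteration count
-- (the length at least doubles each step), the loop itself is transcribed literally
def pvDouble (target : Int) (fuel : Nat) (array : List Int) : List Int :=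
  match fuel with
  | 0 => array
  | f + 1 => if (array.length : Int) < target then pvDouble target f (array ++ array) else array

def pvCreateDictionary (arguments_number : Int) : PySem.Dict String (List Int) :=
  let dictionary : List (String × List Int) :=
    (PySem.List.pyRange 0 arguments_number 1).foldl (fun dictionary i =>
      let index := i + 1
      let same : Int := 2 ^ (arguments_number - index).toNat
      let array := (PySem.List.pyRange 0 same 1).map (fun _ => (0 : Int))
        ++ (PySem.List.pyRange 0 same 1).map (fun _ => (1 : Int))
      let array := pvDouble ((2 : Int) ^ arguments_number.toNat) (2 ^ arguments_number.toNat) array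
      dictionary ++ [("x" ++ PySem.Int.toStr index, array)]) []
  PySem.Dict.ofList dictionary

def PDNF (table : List Int) (arguments_number : Int) : List (List Int) :=
  let arguments := pvCreateDictionary arguments_number
  (PySem.List.pyRange 0 (table.length : Int) 1).foldl (fun formula i =>
    if PySem.List.pyGetD table i 0 = 1 then
      let bracket := (PySem.List.pyRange 1 (arguments_number + 1) 1).foldl
        (fun bracket arg_index =>
          bracket ++ [PySem.List.pyGetD (arguments.getD ("x" ++ PySem.Int.toStr arg_index) []) i 0]) []
      formula ++ [bracket]
    else formula) []

-- ===== PORT B =====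
def PDNF_alt (table : List Int) (arguments_number : Int) : List (List Int) :=
  let n := arguments_number
  if n ≤ 0 then (table.filter (fun v => v == 1)).map (fun _ => ([] : List Int))
  else ((PySem.List.enumerate table).filter (fun p => p.2 == 1)).map
    (fun p => (PySem.List.pyRange 1 (n + 1) 1).map
      (fun k => (((p.1.toNat >>> (n - k).toNat) &&& 1 : Nat) : Int)))

-- ===== PRECONDITION & SPEC =====
-- Pre_ excludes exactly the inputs on which A raises IndexError: arguments_number ≥ 1
-- and some index i ≥ 2^arguments_number with table[i] == 1 (A's columns have length 2^n).
def Pre_PDNF (table : List Int) (arguments_number : Int) : Prop :=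
  arguments_number ≤ 0 ∨
    ∀ i : Nat, i < table.length → table.getD i 0 = 1 → i < 2 ^ arguments_number.toNat
instance (table : List Int) (arguments_number : Int) : Decidable (Pre_PDNF table arguments_number) := by
  unfold Pre_PDNF; infer_instance

def pvWitness_PDNF : List Int × Int := ([1, 0, 1, 1], 2)

def Spec_PDNF (table : List Int) (arguments_number : Int) (out : List (List Int)) : Prop := out = PDNF_alt table arguments_number
instance (table : List Int) (arguments_number : Int) (out : List (List Int)) : Decidable (Spec_PDNF table arguments_number out) := by unfold Spec_PDNF; infer_instance

-- ===== CLAIM (what is proved, stated in full; the proofs are below) =====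
def Claim_equal_PDNF : Prop := ∀ (table : List Int) (arguments_number : Int), Dom_PDNF table arguments_number → Pre_PDNF table arguments_number → Spec_PDNF table arguments_number (PDNF table arguments_number)


-- ===== LEMMAS AND PROOFS =====

-- a structurally clean decimal-digits function, used only to prove 'x'+str(k) keys distinct
def pvDigits (n : Nat) : List Char :=
  if h : n < 10 then [Nat.digitChar n]
  else pvDigits (n / 10) ++ [Nat.digitChar (n % 10)]
decreasing_by exact Nat.div_lt_self (by omega) (by omega)

theorem pvToDigitsCore_eq : ∀ (f n : Nat) (ds : List Char), n < f →
    Nat.toDigitsCore 10 f n ds = pvDigits n ++ ds := by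
  intro f
  induction f with
  | zero => intro n ds h; omega
  | succ f ih =>
    intro n ds h
    rw [Nat.toDigitsCore]
    by_cases h10 : n < 10
    · have : n / 10 = 0 := Nat.div_eq_of_lt h10
      simp [this, pvDigits, h10, Nat.mod_eq_of_lt h10]
    · have hne : ¬ (n / 10 = 0) := by
        intro h0; omega
      simp only [hne, if_false]
      rw [ih (n / 10) _ (by omega)]
      conv_rhs => rw [pvDigits]
      simp [h10]
theorem pvToDigits_eq (n : Nat) : Nat.toDigits 10 n = pvDigits n := by
  rw [Nat.toDigits]
  simpa using pvToDigitsCore_eq (n + 1) n [] (by omega)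

theorem pvDigitChar_toNat (d : Nat) (h : d < 10) : (Nat.digitChar d).toNat = 48 + d := by
  interval_cases d <;> decide

theorem pvDigits_eval : ∀ (n : Nat) (acc : Nat),
    (pvDigits n).foldl (fun a c => a * 10 + (c.toNat - 48)) acc
      = acc * 10 ^ (pvDigits n).length + n := by
  intro n
  induction n using Nat.strong_induction_on with
  | _ n ih =>
    intro acc
    by_cases h : n < 10
    · rw [pvDigits]; simp [h, pvDigitChar_toNat n h]
    · rw [pvDigits]
      simp only [h, dif_neg, not_false_iff, List.foldl_append, List.foldl_cons, List.foldl_nil,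
        List.length_append, List.length_cons, List.length_nil]
      rw [ih (n / 10) (Nat.div_lt_self (by omega) (by omega)) acc]
      rw [pvDigitChar_toNat (n % 10) (Nat.mod_lt _ (by omega))]
      have := Nat.div_add_mod n 10
      ring_nf
      omega

theorem pvDigits_inj {a b : Nat} (h : pvDigits a = pvDigits b) : a = b := by
  have ha := pvDigits_eval a 0
  have hb := pvDigits_eval b 0
  rw [h] at ha
  omega

theorem pvKey_inj {a b : Int} (ha : 1 ≤ a) (hb : 1 ≤ b)
    (h : "x" ++ PySem.Int.toStr a = "x" ++ PySem.Int.toStr b) : a = b := by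
  have h2 : ("x" ++ PySem.Int.toStr a).toList = ("x" ++ PySem.Int.toStr b).toList := by rw [h]
  simp only [String.toList_append, PySem.Int.toList_toStr] at h2
  have h3 : PySem.Int.toChars a = PySem.Int.toChars b := List.append_cancel_left h2
  unfold PySem.Int.toChars at h3
  rw [if_neg (by omega), if_neg (by omega)] at h3
  rw [pvToDigits_eq, pvToDigits_eq] at h3
  have := pvDigits_inj h3
  omega

theorem pvDouble_len : ∀ (f : Nat) (t : Int) (a : List Int), 0 < a.length →
    t ≤ (f : Int) + a.length → t ≤ ((pvDouble t f a).length : Int) := by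
  intro f
  induction f with
  | zero => intro t a h0 h; simpa [pvDouble] using h
  | succ f ih =>
    intro t a h0 h
    rw [pvDouble]
    by_cases hlt : (a.length : Int) < t
    · have := ih t (a ++ a) (by simp; omega) (by simp; push_cast; omega)
      simpa [hlt] using this
    · simpa [hlt] using (by omega : t ≤ (a.length : Int))

theorem pvDouble_getD : ∀ (f : Nat) (t : Int) (a : List Int) (i : Nat), 0 < a.length →
    i < (pvDouble t f a).length →
    (pvDouble t f a).getD i 0 = a.getD (i % a.length) 0 := by
  intro f
  induction f with
  | zero =>
    intro t a i h0 hi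
    rw [pvDouble] at hi ⊢
    rw [Nat.mod_eq_of_lt hi]
  | succ f ih =>
    intro t a i h0 hi
    rw [pvDouble] at hi ⊢
    by_cases hlt : (a.length : Int) < t
    · simp only [hlt, if_true] at hi ⊢
      rw [ih t (a ++ a) i (by simp; omega) hi]
      have hlen : (a ++ a).length = 2 * a.length := by simp; omega
      rw [hlen]
      have hr : i % (2 * a.length) % a.length = i % a.length :=
        Nat.mod_mod_of_dvd i ⟨2, by ring⟩
      have hrlt : i % (2 * a.length) < 2 * a.length := Nat.mod_lt _ (by omega)
      by_cases hc : i % (2 * a.length) < a.length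
      · rw [List.getD_append _ _ _ _ hc, ← hr, Nat.mod_eq_of_lt hc]
      · obtain ⟨r, hrdef⟩ : ∃ r, i % (2 * a.length) = r := ⟨_, rfl⟩
        rw [hrdef] at hr hrlt hc
        have h1 : r - a.length < a.length := by omega
        have e1 : r % a.length = r - a.length := by
          rw [Nat.mod_eq_sub_mod (by omega), Nat.mod_eq_of_lt h1]
        have h2 : r - a.length = i % a.length := by omega
        rw [hrdef]
        rw [List.getD_eq_getElem?_getD, List.getElem?_append_right (by omega), h2,
          ← List.getD_eq_getElem?_getD]
    · simp only [hlt, if_false] at hi ⊢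
      rw [Nat.mod_eq_of_lt hi]


-- the truth-table column built for variable k, as A's create_dictionary builds it
def pvArr (n k : Int) : List Int :=
  pvDouble ((2 : Int) ^ n.toNat) (2 ^ n.toNat)
    ((PySem.List.pyRange 0 ((2 : Int) ^ (n - k).toNat) 1).map (fun _ => (0 : Int))
      ++ (PySem.List.pyRange 0 ((2 : Int) ^ (n - k).toNat) 1).map (fun _ => (1 : Int)))

theorem pvRange_const (s : Int) (c : Int) :
    (PySem.List.pyRange 0 s 1).map (fun _ => c) = List.replicate s.toNat c := by
  rw [PySem.List.pyRange_one]
  simp [Function.comp_def, List.map_const']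

theorem pvPowToNat (m : Nat) : ((2 : Int) ^ m).toNat = 2 ^ m := by
  have : ((2 : Int) ^ m) = ((2 ^ m : Nat) : Int) := by push_cast; ring
  rw [this, Int.toNat_natCast]

theorem pvRep2_getD (S r : Nat) (hr : r < 2 * S) :
    (List.replicate S (0 : Int) ++ List.replicate S (1 : Int)).getD r 0
      = if r < S then 0 else 1 := by
  by_cases hc : r < S
  · rw [List.getD_append _ _ _ _ (by simpa using hc)]
    simp [hc, List.getD_eq_getElem?_getD, List.getElem?_replicate]
  · rw [List.getD_eq_getElem?_getD, List.getElem?_append_right (by simpa using not_lt.mp hc)]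
    simp only [List.length_replicate, List.getElem?_replicate]
    rw [if_pos (by omega)]
    simp [hc]

theorem pvArr_getD (n k : Int) (hk1 : 1 ≤ k) (hk2 : k ≤ n) (j : Nat)
    (hj : j < 2 ^ n.toNat) :
    (pvArr n k).getD j 0 = (((j >>> (n - k).toNat) &&& 1 : Nat) : Int) := by
  unfold pvArr
  rw [pvRange_const, pvRange_const, pvPowToNat]
  set m := (n - k).toNat with hm
  set S := 2 ^ m with hS
  have hSpos : 0 < S := Nat.two_pow_pos m
  have hmn : m < n.toNat := by
    have : (n - k).toNat < n.toNat := by omega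
    simpa [hm]
  have hST : 2 * S ≤ 2 ^ n.toNat := by
    calc 2 * S = 2 ^ (m + 1) := by rw [hS]; ring
    _ ≤ 2 ^ n.toNat := Nat.pow_le_pow_right (by omega) (by omega)
  have hlen0 : (List.replicate S (0 : Int) ++ List.replicate S (1 : Int)).length = 2 * S := by
    simp; ring
  have hlen : ((2 : Int) ^ n.toNat) ≤
      ((pvDouble ((2 : Int) ^ n.toNat) (2 ^ n.toNat)
        (List.replicate S (0 : Int) ++ List.replicate S (1 : Int))).length : Int) := by
    apply pvDouble_len
    · omega
    · rw [hlen0]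
      have : ((2 : Int) ^ n.toNat) = ((2 ^ n.toNat : Nat) : Int) := by push_cast; ring
      rw [this]
      push_cast
      omega
  have hjlt : j < (pvDouble ((2 : Int) ^ n.toNat) (2 ^ n.toNat)
      (List.replicate S (0 : Int) ++ List.replicate S (1 : Int))).length := by
    have hcast : ((2 ^ n.toNat : Nat) : Int) = (2 : Int) ^ n.toNat := by push_cast; ring
    have hji : (j : Int) < (2 : Int) ^ n.toNat := by
      rw [← hcast]; exact_mod_cast hj
    exact_mod_cast lt_of_lt_of_le hji hlen
  rw [pvDouble_getD _ _ _ _ (by omega) hjlt, hlen0]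
  rw [pvRep2_getD S (j % (2 * S)) (Nat.mod_lt _ (by omega))]
  rw [Nat.shiftRight_eq_div_pow, Nat.and_one_is_mod]
  have hmul : j % (2 * S) = j % S + S * (j / S % 2) := by
    rw [mul_comm 2 S]
    exact Nat.mod_mul
  have hd : j / S % 2 = 0 ∨ j / S % 2 = 1 := by omega
  have hjS : j % S < S := Nat.mod_lt _ (by omega)
  rcases hd with hd | hd
  · rw [hd] at hmul
    simp only [Nat.mul_zero, Nat.add_zero] at hmul
    rw [if_pos (by omega), hd]; simp
  · rw [hd] at hmul
    simp only [Nat.mul_one] at hmul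
    rw [if_neg (by omega), hd]; simp

theorem pvDict_items (n : Int) :
    (pvCreateDictionary n).items
      = (PySem.List.pyRange 0 n 1).map (fun i => ("x" ++ PySem.Int.toStr (i + 1), pvArr n (i + 1))) := by
  unfold pvCreateDictionary
  simp only []
  rw [PySem.List.foldl_append_singleton_eq_map]
  simp only [List.nil_append]
  have hofList : PySem.Dict.ofList
      ((PySem.List.pyRange 0 n 1).map (fun i => ("x" ++ PySem.Int.toStr (i + 1), pvArr n (i + 1))))
      = ((PySem.List.pyRange 0 n 1).map (fun i => ("x" ++ PySem.Int.toStr (i + 1), pvArr n (i + 1)))).foldl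
          (fun d p => d.insert p.1 p.2) PySem.Dict.empty := rfl
  rw [show (fun i => ("x" ++ PySem.Int.toStr (i + 1),
      pvDouble ((2 : Int) ^ n.toNat) (2 ^ n.toNat)
        ((PySem.List.pyRange 0 ((2:Int) ^ (n - (i + 1)).toNat) 1).map (fun _ => (0 : Int))
          ++ (PySem.List.pyRange 0 ((2:Int) ^ (n - (i + 1)).toNat) 1).map (fun _ => (1 : Int)))))
      = (fun i => ("x" ++ PySem.Int.toStr (i + 1), pvArr n (i + 1))) from rfl]
  rw [hofList, List.foldl_map]
  have hfresh : ∀ a ∈ PySem.List.pyRange 0 n 1,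
      (PySem.Dict.empty : PySem.Dict String (List Int)).contains ("x" ++ PySem.Int.toStr (a + 1)) = false :=
    fun a _ => rfl
  have hnd : ((PySem.List.pyRange 0 n 1).map (fun i => "x" ++ PySem.Int.toStr (i + 1))).Nodup := by
    apply List.Nodup.map_on
    · intro x hx y hy hxy
      have hx' := (PySem.List.mem_pyRange_one.mp hx).1
      have hy' := (PySem.List.mem_pyRange_one.mp hy).1
      have := pvKey_inj (by omega) (by omega) hxy
      omega
    · exact PySem.List.nodup_pyRange_one 0 n
  rw [PySem.Dict.items_foldl_insert_fresh _ _ _ _ hfresh hnd]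
  rfl

theorem pvDict_lookup (n k : Int) (hk1 : 1 ≤ k) (hkn : k ≤ n) :
    (pvCreateDictionary n).getD ("x" ++ PySem.Int.toStr k) [] = pvArr n k := by
  apply PySem.Dict.getD_of_mem_items
  · rw [pvDict_items]
    apply List.mem_map.mpr
    refine ⟨k - 1, ?_, by norm_num⟩
    exact PySem.List.mem_pyRange_one.mpr ⟨by omega, by omega⟩
  · have : (pvCreateDictionary n).keys
        = ((PySem.List.pyRange 0 n 1).map (fun i => "x" ++ PySem.Int.toStr (i + 1))) := by
      simp only [PySem.Dict.keys, pvDict_items, List.map_map]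
      rfl
    rw [this]
    apply List.Nodup.map_on
    · intro x hx y hy hxy
      have hx' := (PySem.List.mem_pyRange_one.mp hx).1
      have hy' := (PySem.List.mem_pyRange_one.mp hy).1
      have := pvKey_inj (by omega) (by omega) hxy
      omega
    · exact PySem.List.nodup_pyRange_one 0 n

theorem pvBracket (n i : Int) (hn : ¬ n ≤ 0) (hi0 : 0 ≤ i) (hi2 : i.toNat < 2 ^ n.toNat) :
    (PySem.List.pyRange 1 (n + 1) 1).foldl
      (fun bracket arg_index =>
        bracket ++ [PySem.List.pyGetD ((pvCreateDictionary n).getD ("x" ++ PySem.Int.toStr arg_index) []) i 0]) []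
    = (PySem.List.pyRange 1 (n + 1) 1).map
        (fun k => (((i.toNat >>> (n - k).toNat) &&& 1 : Nat) : Int)) := by
  rw [PySem.List.foldl_append_singleton_eq_map]
  simp only [List.nil_append]
  apply List.map_congr_left
  intro k hk
  obtain ⟨hk1, hk2⟩ := PySem.List.mem_pyRange_one.mp hk
  rw [pvDict_lookup n k hk1 (by omega)]
  rw [show i = ((i.toNat : Nat) : Int) from (Int.toNat_of_nonneg hi0).symm,
    PySem.List.pyGetD_natCast]
  exact pvArr_getD n k hk1 (by omega) i.toNat hi2

theorem pvMain : ∀ (table : List Int) (n : Int),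
    Pre_PDNF table n → PDNF table n = PDNF_alt table n := by
  intro table n hpre
  by_cases hn : n ≤ 0
  · unfold PDNF
    simp only [PySem.List.pyRange_one_eq_nil (show n + 1 ≤ 1 by omega), List.foldl_nil]
    rw [PySem.List.foldl_pyRange_zero_pyGetD' table 0
      (fun formula v => if v = 1 then formula ++ [([] : List Int)] else formula) []]
    rw [PySem.List.foldl_append_ite (fun v => v = 1) (fun _ => ([] : List Int))]
    simp only [PDNF_alt, if_pos hn, List.nil_append]
    congr 1
  · unfold PDNF
    simp only []
    rw [PySem.List.foldl_append_ite (fun i => PySem.List.pyGetD table i 0 = 1)]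
    simp only [PDNF_alt, if_neg hn, List.nil_append]
    rw [PySem.List.enumerate_eq_map_pyRange table 0, List.filter_map, List.map_map]
    have hfil : List.filter ((fun (p : Int × Int) => p.2 == 1) ∘ (fun j => (j, PySem.List.pyGetD table j 0)))
          (PySem.List.pyRange 0 (PySem.List.len table) 1)
        = List.filter (fun x => decide (PySem.List.pyGetD table x 0 = 1))
          (PySem.List.pyRange 0 (table.length : Int) 1) := by
      have hl : PySem.List.len table = (table.length : Int) := by simp
      rw [hl]
      apply List.filter_congr
      intro x _
      by_cases h : PySem.List.pyGetD table x 0 = 1 <;> simp [h]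
    rw [hfil]
    apply List.map_congr_left
    intro i hi
    rw [List.mem_filter] at hi
    obtain ⟨him, hval⟩ := hi
    obtain ⟨hi0, hilen⟩ := PySem.List.mem_pyRange_one.mp him
    have hval' : PySem.List.pyGetD table i 0 = 1 := by simpa using hval
    have hgetd : table.getD i.toNat 0 = 1 := by
      rw [show i = ((i.toNat : Nat) : Int) from (Int.toNat_of_nonneg hi0).symm,
        PySem.List.pyGetD_natCast] at hval'
      exact hval'
    have hi2 : i.toNat < 2 ^ n.toNat := by
      rcases hpre with h | h
      · omega
      · exact h i.toNat (by omega) hgetd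
    simp only [Function.comp]
    exact pvBracket n i hn hi0 hi2

-- ===== VERDICT (by name: the statement is the Claim_ definition above) =====
theorem PDNF_spec : Claim_equal_PDNF := by
  intro table n _ hpre
  exact pvMain table n hpre
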